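-- pv_equiv track=rewrite | github.com/ybshah02/ucla-courses | CS 122 -- Algorithms in Bioinformatics/project 2b/build_genome.py | create_cycle_from_path
-- ===== SOURCE A (Python) =====
-- def create_cycle_from_path(input_graph, start_node):
--     cycle_items = []
--     remaining_edges = [start_node]
--     while remaining_edges:
--         current_node = remaining_edges[-1]
--         if current_node in input_graph and input_graph[current_node]:
--             edge = input_graph[current_node][-1]
--             input_graph[current_node] = input_graph[current_node][:-1]
--             remaining_edges.append(edge)
--         else:
--             cycle_items.append(remaining_edges[-1])
--             remaining_edges = remaining_edges[:-1]
--     cycle_items = cycle_items[::-1][:-1]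
--     return cycle_items
-- ===== SOURCE B (Python) =====
-- def create_cycle_from_path(input_graph, start_node):
--     # Recursive Hierholzer: postorder DFS consuming last edges (mutates
--     # input_graph by slice-reassignment exactly like the original).
--     result = []
--
--     def visit(node):
--         while node in input_graph and input_graph[node]:
--             edge = input_graph[node][-1]
--             input_graph[node] = input_graph[node][:-1]
--             visit(edge)
--         result.append(node)
--
--     visit(start_node)
--     return result[::-1][:-1]
-- ===== Notes on version B (the rewrite author's own statement) =====
-- stated objective: alternative
-- what changed: A's explicit-stack while loop (top of remaining_edges re-read each iteration, stack sliced/extended by hand) is replaced by a recursive Hierholzer helper visit(node) that consumes the node's last edges, recurses, and appends the node in postorder to a shared result list.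
import Mathlib
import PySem

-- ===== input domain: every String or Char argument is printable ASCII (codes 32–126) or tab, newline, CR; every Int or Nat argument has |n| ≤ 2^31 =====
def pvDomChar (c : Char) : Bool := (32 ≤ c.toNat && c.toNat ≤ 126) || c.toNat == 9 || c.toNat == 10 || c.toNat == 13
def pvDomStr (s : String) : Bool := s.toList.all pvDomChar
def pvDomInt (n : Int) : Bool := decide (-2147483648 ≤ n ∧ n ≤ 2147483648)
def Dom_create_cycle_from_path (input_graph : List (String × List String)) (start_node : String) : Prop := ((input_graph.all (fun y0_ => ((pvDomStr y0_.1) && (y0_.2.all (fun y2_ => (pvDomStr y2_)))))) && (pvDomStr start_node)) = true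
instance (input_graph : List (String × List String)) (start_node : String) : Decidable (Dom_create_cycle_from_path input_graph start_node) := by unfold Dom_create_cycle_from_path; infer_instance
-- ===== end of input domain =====

-- B replaces A's explicit-stack Hierholzer loop by a recursive DFS helper (postorder visit); objective: alternative decomposition.
-- Both A and B mutate the Python dict argument in the same way (slice-reassignment of adjacency lists); the equivalence proved here is about the return value.


-- ===== PORT A =====
-- total number of remaining edges; used only to compute a sufficient fuel bound
def pvEdgeSum (g : PySem.Dict String (List String)) : Nat :=
  (g.items.map (fun p => p.2.length)).sum

-- A's while loop, step for step (fuel only makes it total: each iteration either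
-- consumes one edge or pops the stack, so 2*edges+2 iterations always suffice
-- on duplicate-free dicts — proved below, never assumed).
def pvLoopA : Nat → PySem.Dict String (List String) → List String → List String → List String
  | 0, _, _, cycle_items => cycle_items
  | fuel+1, g, remaining_edges, cycle_items =>
    match remaining_edges.getLast? with                       -- while remaining_edges: current_node = remaining_edges[-1]
    | none => cycle_items
    | some current_node =>
      match g.get? current_node with                          -- current_node in input_graph and input_graph[current_node]
      | some (a :: adj) =>
          -- edge = input_graph[current_node][-1]; input_graph[current_node] = …[:-1]; remaining_edges.append(edge)
          pvLoopA fuel (g.insert current_node (a :: adj).dropLast)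
            (remaining_edges ++ [(a :: adj).getLast (by simp)]) cycle_items
      | _ =>
          -- cycle_items.append(remaining_edges[-1]); remaining_edges = remaining_edges[:-1]
          pvLoopA fuel g remaining_edges.dropLast (cycle_items ++ [current_node])

def create_cycle_from_path (input_graph : List (String × List String)) (start_node : String) : List String :=
  let g : PySem.Dict String (List String) := PySem.Dict.mk input_graph
  -- cycle_items[::-1][:-1] = reverse then dropLast
  (pvLoopA (2 * pvEdgeSum g + 2) g [start_node] []).reverse.dropLast

-- ===== PORT B =====
-- Source B's recursive helper visit(node): while node has edges take the last one,
-- remove it, recurse, and finally append node (postorder).  Returns the mutated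
-- graph together with the result list.  Fuel only makes it total: along any call
-- chain the edge count strictly decreases, so edges+1 suffices (proved below).
def pvVisit : Nat → String → PySem.Dict String (List String) → List String → PySem.Dict String (List String) × List String
  | 0, _, g, result => (g, result)
  | fuel+1, node, g, result =>
    match g.get? node with
    | some (a :: adj) =>
        let p := pvVisit fuel ((a :: adj).getLast (by simp)) (g.insert node (a :: adj).dropLast) result
        pvVisit fuel node p.1 p.2                            -- the while loop continues on node
    | _ => (g, result ++ [node])                             -- result.append(node)

def create_cycle_from_path_alt (input_graph : List (String × List String)) (start_node : String) : List String :=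
  let g : PySem.Dict String (List String) := PySem.Dict.mk input_graph
  ((pvVisit (pvEdgeSum g + 1) start_node g []).2).reverse.dropLast      -- result[::-1][:-1]

-- ===== PRECONDITION & SPEC =====
-- Pre_ excludes association lists with duplicate keys: such inputs cannot arise from a
-- Python dict (A's input_graph is a dict, whose keys are necessarily distinct), so no
-- input A actually receives is excluded.
def Pre_create_cycle_from_path (input_graph : List (String × List String)) (start_node : String) : Prop :=
  (input_graph.map Prod.fst).Nodup

instance (input_graph : List (String × List String)) (start_node : String) : Decidable (Pre_create_cycle_from_path input_graph start_node) := by unfold Pre_create_cycle_from_path; infer_instance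

def pvWitness_create_cycle_from_path : (List (String × List String)) × String :=
  ([("a", ["b", "a"]), ("b", ["a"])], "a")

def Spec_create_cycle_from_path (input_graph : List (String × List String)) (start_node : String) (out : List String) : Prop := out = create_cycle_from_path_alt input_graph start_node
instance (input_graph : List (String × List String)) (start_node : String) (out : List String) : Decidable (Spec_create_cycle_from_path input_graph start_node out) := by unfold Spec_create_cycle_from_path; infer_instance

-- ===== CLAIM (what is proved, stated in full; the proofs are below) =====
def Claim_equal_create_cycle_from_path : Prop := ∀ (input_graph : List (String × List String)) (start_node : String), Dom_create_cycle_from_path input_graph start_node → Pre_create_cycle_from_path input_graph start_node → Spec_create_cycle_from_path input_graph start_node (create_cycle_from_path input_graph start_node)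

-- ===== LEMMAS AND PROOFS =====

def pvKeys (g : PySem.Dict String (List String)) : List String := g.items.map Prod.fst

theorem pv_get_le (items : List (String × List String)) (k : String) (adj : List String)
    (h : (PySem.Dict.mk items).get? k = some adj) : adj.length ≤ pvEdgeSum (PySem.Dict.mk items) := by
  induction items with
  | nil => simp [PySem.Dict.get?] at h
  | cons hd t ih =>
    by_cases hk : hd.1 = k
    · simp [PySem.Dict.get?, List.find?, hk] at h
      simp [pvEdgeSum, ← h]
    · simp only [PySem.Dict.get?, List.find?] at h ih
      rw [show (hd.1 == k) = false by simp [hk]] at h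
      have := ih h
      simp [pvEdgeSum] at this ⊢
      omega

theorem pv_contains_of_get (items : List (String × List String)) (k : String) (adj : List String)
    (h : (PySem.Dict.mk items).get? k = some adj) : (PySem.Dict.mk items).contains k = true := by
  simp only [PySem.Dict.get?, Option.map_eq_some_iff] at h
  obtain ⟨pr, hpr, -⟩ := h
  simp only [PySem.Dict.contains, List.any_eq_true]
  exact ⟨pr, List.mem_of_find?_eq_some hpr, List.find?_some (p := fun (p : String × List String) => p.1 == k) hpr⟩

theorem pv_insert_eq_repl (items : List (String × List String)) (k : String) (v : List String)
    (h : (PySem.Dict.mk items).contains k = true) :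
    (PySem.Dict.mk items).insert k v = PySem.Dict.mk (items.map (fun p => if p.1 == k then (k, v) else p)) := by
  simp [PySem.Dict.insert, h]

theorem pv_repl_id (t : List (String × List String)) (k : String) (v : List String)
    (hk : k ∉ t.map Prod.fst) : t.map (fun p => if p.1 == k then (k, v) else p) = t := by
  induction t with
  | nil => rfl
  | cons hd t ih =>
    simp only [List.map_cons, List.mem_cons, not_or] at hk ⊢
    rw [if_neg (by simp [Ne.symm hk.1]), ih hk.2]

theorem pv_insert_present (items : List (String × List String)) (k : String) (adj v : List String)
    (h : (PySem.Dict.mk items).get? k = some adj) (hnd : (items.map Prod.fst).Nodup) :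
    pvKeys ((PySem.Dict.mk items).insert k v) = items.map Prod.fst ∧
    pvEdgeSum ((PySem.Dict.mk items).insert k v) + adj.length = pvEdgeSum (PySem.Dict.mk items) + v.length := by
  rw [pv_insert_eq_repl items k v (pv_contains_of_get items k adj h)]
  induction items with
  | nil => simp [PySem.Dict.get?] at h
  | cons hd t ih =>
    simp only [List.map_cons, List.nodup_cons] at hnd
    by_cases hk : hd.1 = k
    · simp only [PySem.Dict.get?, List.find?] at h
      rw [show (hd.1 == k) = true by simp [hk]] at h
      simp only [Option.map_some] at h
      have hadj : hd.2 = adj := by injection h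
      subst hk
      rw [List.map_cons, if_pos (by simp), pv_repl_id t hd.1 v hnd.1]
      constructor
      · simp [pvKeys]
      · simp [pvEdgeSum, ← hadj]; omega
    · simp only [PySem.Dict.get?, List.find?] at h
      rw [show (hd.1 == k) = false by simp [hk]] at h
      obtain ⟨ih1, ih2⟩ := ih h hnd.2
      rw [List.map_cons, if_neg (by simp [hk])]
      constructor
      · simpa [pvKeys] using ih1
      · simp only [pvEdgeSum, List.map_cons, List.sum_cons] at ih2 ⊢
        omega

theorem pv_get_le' (g : PySem.Dict String (List String)) (k : String) (adj : List String)
    (h : g.get? k = some adj) : adj.length ≤ pvEdgeSum g := by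
  obtain ⟨items⟩ := g; exact pv_get_le items k adj h

theorem pv_insert_present' (g : PySem.Dict String (List String)) (k : String) (adj v : List String)
    (h : g.get? k = some adj) (hnd : (pvKeys g).Nodup) :
    pvKeys (g.insert k v) = pvKeys g ∧ pvEdgeSum (g.insert k v) + adj.length = pvEdgeSum g + v.length := by
  obtain ⟨items⟩ := g; exact pv_insert_present items k adj v h hnd

theorem pvVisit_step (fuel : Nat) (node : String) (g : PySem.Dict String (List String)) (res : List String)
    (a : String) (t : List String) (h : g.get? node = some (a :: t)) :
    pvVisit (fuel+1) node g res =
      pvVisit fuel node (pvVisit fuel ((a :: t).getLast (by simp)) (g.insert node (a :: t).dropLast) res).1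
        (pvVisit fuel ((a :: t).getLast (by simp)) (g.insert node (a :: t).dropLast) res).2 := by
  conv_lhs => rw [pvVisit, h]

theorem pvVisit_none (fuel : Nat) (node : String) (g : PySem.Dict String (List String)) (res : List String)
    (h : g.get? node = none) : pvVisit (fuel+1) node g res = (g, res ++ [node]) := by
  conv_lhs => rw [pvVisit, h]

theorem pvVisit_nil (fuel : Nat) (node : String) (g : PySem.Dict String (List String)) (res : List String)
    (h : g.get? node = some []) : pvVisit (fuel+1) node g res = (g, res ++ [node]) := by
  conv_lhs => rw [pvVisit, h]

theorem pv_visit_inv (n : Nat) : ∀ (g : PySem.Dict String (List String)) (node : String) (res : List String) (fuel : Nat),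
    pvEdgeSum g = n → (pvKeys g).Nodup → n < fuel →
    pvVisit fuel node g res = pvVisit (n+1) node g res ∧
    pvKeys (pvVisit (n+1) node g res).1 = pvKeys g ∧
    pvEdgeSum (pvVisit (n+1) node g res).1 ≤ n := by
  induction n using Nat.strong_induction_on with
  | _ n IH =>
    intro g node res fuel hec hnd hfuel
    obtain ⟨f, rfl⟩ : ∃ f, fuel = f + 1 := ⟨fuel - 1, by omega⟩
    rcases hg : g.get? node with _ | adj
    · refine ⟨?_, ?_, ?_⟩
      · rw [pvVisit_none f node g res hg, pvVisit_none n node g res hg]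
      · rw [pvVisit_none n node g res hg]
      · rw [pvVisit_none n node g res hg]; exact le_of_eq hec
    · rcases adj with _ | ⟨a, t⟩
      · refine ⟨?_, ?_, ?_⟩
        · rw [pvVisit_nil f node g res hg, pvVisit_nil n node g res hg]
        · rw [pvVisit_nil n node g res hg]
        · rw [pvVisit_nil n node g res hg]; exact le_of_eq hec
      · have hlen : (a :: t).length ≤ n := hec ▸ pv_get_le' g node (a :: t) hg
        have hpos : 1 ≤ n := le_trans (by simp) hlen
        obtain ⟨m, rfl⟩ : ∃ m, n = m + 1 := ⟨n - 1, by omega⟩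
        obtain ⟨hk', hs'⟩ := pv_insert_present' g node (a :: t) (a :: t).dropLast hg hnd
        have hknd' : (pvKeys (g.insert node (a :: t).dropLast)).Nodup := hk' ▸ hnd
        have hec' : pvEdgeSum (g.insert node (a :: t).dropLast) = m := by
          have h2 : (a :: t).dropLast.length = t.length := by simp
          have h3 : (a :: t).length = t.length + 1 := by simp
          omega
        obtain ⟨IHf1, IHf2, IHf3⟩ := IH m (by omega)
          (g.insert node (a :: t).dropLast) ((a :: t).getLast (by simp)) res f hec' hknd' (by omega)
        have hkndp : (pvKeys (pvVisit (m+1) ((a :: t).getLast (by simp)) (g.insert node (a :: t).dropLast) res).1).Nodup := by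
          rw [IHf2]; exact hknd'
        obtain ⟨IH2f1, IH2f2, IH2f3⟩ := IH
          (pvEdgeSum (pvVisit (m+1) ((a :: t).getLast (by simp)) (g.insert node (a :: t).dropLast) res).1) (by omega)
          (pvVisit (m+1) ((a :: t).getLast (by simp)) (g.insert node (a :: t).dropLast) res).1 node
          (pvVisit (m+1) ((a :: t).getLast (by simp)) (g.insert node (a :: t).dropLast) res).2 f rfl hkndp (by omega)
        obtain ⟨IH2n1, -, -⟩ := IH
          (pvEdgeSum (pvVisit (m+1) ((a :: t).getLast (by simp)) (g.insert node (a :: t).dropLast) res).1) (by omega)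
          (pvVisit (m+1) ((a :: t).getLast (by simp)) (g.insert node (a :: t).dropLast) res).1 node
          (pvVisit (m+1) ((a :: t).getLast (by simp)) (g.insert node (a :: t).dropLast) res).2 (m+1) rfl hkndp (by omega)
        refine ⟨?_, ?_, ?_⟩
        · rw [pvVisit_step f node g res a t hg, pvVisit_step (m+1) node g res a t hg, IHf1, IH2f1, IH2n1]
        · rw [pvVisit_step (m+1) node g res a t hg, IH2n1, IH2f2, IHf2, hk']
        · rw [pvVisit_step (m+1) node g res a t hg, IH2n1]; omega

def pvRunRev : PySem.Dict String (List String) → List String → List String → List String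
  | _, [], res => res
  | g, node :: rest, res =>
      let p := pvVisit (pvEdgeSum g + 1) node g res
      pvRunRev p.1 rest p.2

theorem pvLoopA_empty (f : Nat) (g : PySem.Dict String (List String)) (res : List String) :
    pvLoopA (f+1) g [] res = res := rfl

theorem pvLoopA_push (f : Nat) (g : PySem.Dict String (List String)) (rest res : List String)
    (top a : String) (t : List String) (h : g.get? top = some (a :: t)) :
    pvLoopA (f+1) g (rest ++ [top]) res =
      pvLoopA f (g.insert top (a :: t).dropLast) ((rest ++ [top]) ++ [(a :: t).getLast (by simp)]) res := by
  rw [pvLoopA, List.getLast?_concat]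
  simp only [h]

theorem pvLoopA_pop_none (f : Nat) (g : PySem.Dict String (List String)) (rest res : List String)
    (top : String) (h : g.get? top = none) :
    pvLoopA (f+1) g (rest ++ [top]) res = pvLoopA f g rest (res ++ [top]) := by
  rw [pvLoopA, List.getLast?_concat]
  simp only [h, List.dropLast_concat]

theorem pvLoopA_pop_nil (f : Nat) (g : PySem.Dict String (List String)) (rest res : List String)
    (top : String) (h : g.get? top = some []) :
    pvLoopA (f+1) g (rest ++ [top]) res = pvLoopA f g rest (res ++ [top]) := by
  rw [pvLoopA, List.getLast?_concat]
  simp only [h, List.dropLast_concat]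

theorem pv_sim (N : Nat) : ∀ (g : PySem.Dict String (List String)) (stack res : List String) (fuel : Nat),
    2 * pvEdgeSum g + stack.length = N → (pvKeys g).Nodup → N < fuel →
    pvLoopA fuel g stack res = pvRunRev g stack.reverse res := by
  induction N using Nat.strong_induction_on with
  | _ N IH =>
    intro g stack res fuel hN hnd hfuel
    obtain ⟨f, rfl⟩ : ∃ f, fuel = f + 1 := ⟨fuel - 1, by omega⟩
    rcases List.eq_nil_or_concat stack with rfl | ⟨rest, top, rfl⟩
    · rw [pvLoopA_empty, List.reverse_nil, pvRunRev]
    · simp only [List.concat_eq_append] at hN ⊢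
      have hlen : (rest ++ [top]).length = rest.length + 1 := by simp
      have hrev : (rest ++ [top]).reverse = top :: rest.reverse := by simp
      rcases hg : g.get? top with _ | adj
      · rw [pvLoopA_pop_none f g rest res top hg,
            IH (N-1) (by omega) g rest (res ++ [top]) f (by omega) hnd (by omega),
            hrev, pvRunRev, pvVisit_none (pvEdgeSum g) top g res hg]
      · rcases adj with _ | ⟨a, t⟩
        · rw [pvLoopA_pop_nil f g rest res top hg,
              IH (N-1) (by omega) g rest (res ++ [top]) f (by omega) hnd (by omega),
              hrev, pvRunRev, pvVisit_nil (pvEdgeSum g) top g res hg]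
        · -- push branch
          have hlen2 : (a :: t).length ≤ pvEdgeSum g := pv_get_le' g top (a :: t) hg
          have hpos : 1 ≤ pvEdgeSum g := le_trans (by simp) hlen2
          obtain ⟨hk', hs'⟩ := pv_insert_present' g top (a :: t) (a :: t).dropLast hg hnd
          have hknd' : (pvKeys (g.insert top (a :: t).dropLast)).Nodup := hk' ▸ hnd
          have hec' : pvEdgeSum (g.insert top (a :: t).dropLast) = pvEdgeSum g - 1 := by
            have h2 : (a :: t).dropLast.length = t.length := by simp
            have h3 : (a :: t).length = t.length + 1 := by simp
            omega
          rw [pvLoopA_push f g rest res top a t hg,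
              IH (N-1) (by omega) (g.insert top (a :: t).dropLast)
                ((rest ++ [top]) ++ [(a :: t).getLast (by simp)]) res f (by simp; omega) hknd' (by omega)]
          have hrev2 : ((rest ++ [top]) ++ [(a :: t).getLast (by simp [List.cons_ne_nil])]).reverse
              = (a :: t).getLast (by simp) :: top :: rest.reverse := by simp
          rw [hrev2, hrev]
          -- unfold pvRunRev on both sides one step each
          rw [pvRunRev, pvRunRev, pvRunRev]
          -- RHS visit: pvVisit (pvEdgeSum g + 1) top g res
          obtain ⟨m, hm⟩ : ∃ m, pvEdgeSum g = m + 1 := ⟨pvEdgeSum g - 1, by omega⟩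
          have hm' : pvEdgeSum (g.insert top (a :: t).dropLast) = m := by omega
          obtain ⟨-, hK, hE⟩ := pv_visit_inv m (g.insert top (a :: t).dropLast)
            ((a :: t).getLast (by simp)) res (m+1) hm' hknd' (by omega)
          have hkndp : (pvKeys (pvVisit (m+1) ((a :: t).getLast (by simp)) (g.insert top (a :: t).dropLast) res).1).Nodup := by
            rw [hK]; exact hknd'
          obtain ⟨hIrr, -, -⟩ := pv_visit_inv
            (pvEdgeSum (pvVisit (m+1) ((a :: t).getLast (by simp)) (g.insert top (a :: t).dropLast) res).1)
            (pvVisit (m+1) ((a :: t).getLast (by simp)) (g.insert top (a :: t).dropLast) res).1 top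
            (pvVisit (m+1) ((a :: t).getLast (by simp)) (g.insert top (a :: t).dropLast) res).2 (m+1) rfl hkndp (by omega)
          rw [hm, hm', pvVisit_step (m+1) top g res a t hg, hIrr]

-- ===== VERDICT (by name: the statement is the Claim_ definition above) =====
theorem create_cycle_from_path_spec : Claim_equal_create_cycle_from_path := by
  intro input_graph start_node _hdom hpre
  unfold Spec_create_cycle_from_path
  show (pvLoopA (2 * pvEdgeSum (PySem.Dict.mk input_graph) + 2) (PySem.Dict.mk input_graph) [start_node] []).reverse.dropLast
      = ((pvVisit (pvEdgeSum (PySem.Dict.mk input_graph) + 1) start_node (PySem.Dict.mk input_graph) []).2).reverse.dropLast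
  have hnd : (pvKeys (PySem.Dict.mk input_graph)).Nodup := hpre
  rw [pv_sim (2 * pvEdgeSum (PySem.Dict.mk input_graph) + 1) (PySem.Dict.mk input_graph) [start_node] []
      (2 * pvEdgeSum (PySem.Dict.mk input_graph) + 2) (by simp) hnd (by omega)]
  rw [List.reverse_singleton, pvRunRev, pvRunRev]
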